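-- pv_equiv track=rewrite | github.com/MikleMasterMind/ns3-bbr-packet-based-load-balancing | scratch/analyze_trace.py | analyze_tcp_flags
-- ===== SOURCE A (Python) =====
-- def analyze_tcp_flags(flags_list):
--     """Анализирует TCP флаги."""
--     flags_dict = {
--         'SYN': any('SYN' in flag for flag in flags_list),
--         'ACK': any('ACK' in flag for flag in flags_list),
--         'FIN': any('FIN' in flag for flag in flags_list),
--         'RST': any('RST' in flag for flag in flags_list),
--         'PSH': any('PSH' in flag for flag in flags_list),
--     }
--     return flags_dict
-- ===== SOURCE B (Python) =====
-- def analyze_tcp_flags(flags_list):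
--     """Анализирует TCP флаги."""
--     syn = ack = fin = rst = psh = False
--     for flag in flags_list:
--         syn = syn or 'SYN' in flag
--         ack = ack or 'ACK' in flag
--         fin = fin or 'FIN' in flag
--         rst = rst or 'RST' in flag
--         psh = psh or 'PSH' in flag
--     return {'SYN': syn, 'ACK': ack, 'FIN': fin, 'RST': rst, 'PSH': psh}
-- ===== Notes on version B (the rewrite author's own statement) =====
-- stated objective: alternative
-- what changed: Replaces five independent any() scans over the list with one single pass that accumulates all five flag booleans simultaneously.
import Mathlib
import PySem

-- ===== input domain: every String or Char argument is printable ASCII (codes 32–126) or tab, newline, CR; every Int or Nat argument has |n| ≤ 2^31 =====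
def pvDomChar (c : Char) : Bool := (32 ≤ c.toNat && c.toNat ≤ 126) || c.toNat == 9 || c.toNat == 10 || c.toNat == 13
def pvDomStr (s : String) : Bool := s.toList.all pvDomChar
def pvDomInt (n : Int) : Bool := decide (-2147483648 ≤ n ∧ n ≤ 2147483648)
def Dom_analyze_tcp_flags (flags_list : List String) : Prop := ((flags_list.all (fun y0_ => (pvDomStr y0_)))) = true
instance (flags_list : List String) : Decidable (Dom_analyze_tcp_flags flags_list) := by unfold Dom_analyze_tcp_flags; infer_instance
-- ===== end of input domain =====

-- B makes ONE pass accumulating all five booleans instead of A's five independent any() scans.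

-- ===== PORT A =====
-- dict literal with five 'any' comprehensions, in insertion order
def analyze_tcp_flags (flags_list : List String) : List (String × Bool) :=
  [("SYN", flags_list.any (fun flag => PySem.Str.isIn "SYN" flag)),
   ("ACK", flags_list.any (fun flag => PySem.Str.isIn "ACK" flag)),
   ("FIN", flags_list.any (fun flag => PySem.Str.isIn "FIN" flag)),
   ("RST", flags_list.any (fun flag => PySem.Str.isIn "RST" flag)),
   ("PSH", flags_list.any (fun flag => PySem.Str.isIn "PSH" flag))]

-- ===== PORT B =====
-- the single loop of Source B over a 5-tuple of accumulators
def analyze_tcp_flags_altLoop (flags_list : List String)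
    (s : Bool × Bool × Bool × Bool × Bool) : Bool × Bool × Bool × Bool × Bool :=
  flags_list.foldl
    (fun s flag =>
      (s.1 || PySem.Str.isIn "SYN" flag,
       s.2.1 || PySem.Str.isIn "ACK" flag,
       s.2.2.1 || PySem.Str.isIn "FIN" flag,
       s.2.2.2.1 || PySem.Str.isIn "RST" flag,
       s.2.2.2.2 || PySem.Str.isIn "PSH" flag)) s

def analyze_tcp_flags_alt (flags_list : List String) : List (String × Bool) :=
  let r := analyze_tcp_flags_altLoop flags_list (false, false, false, false, false)
  [("SYN", r.1), ("ACK", r.2.1), ("FIN", r.2.2.1), ("RST", r.2.2.2.1), ("PSH", r.2.2.2.2)]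

-- ===== PRECONDITION & SPEC =====
def Spec_analyze_tcp_flags (flags_list : List String) (out : List (String × Bool)) : Prop := out = analyze_tcp_flags_alt flags_list
instance (flags_list : List String) (out : List (String × Bool)) : Decidable (Spec_analyze_tcp_flags flags_list out) := by unfold Spec_analyze_tcp_flags; infer_instance

-- ===== CLAIM (what is proved, stated in full; the proofs are below) =====
def Claim_equal_analyze_tcp_flags : Prop := ∀ (flags_list : List String), Dom_analyze_tcp_flags flags_list → Spec_analyze_tcp_flags flags_list (analyze_tcp_flags flags_list)

-- ===== LEMMAS AND PROOFS =====
theorem altLoop_eq (flags_list : List String) (a b c d e : Bool) :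
    analyze_tcp_flags_altLoop flags_list (a, b, c, d, e) =
      (a || flags_list.any (fun f => PySem.Str.isIn "SYN" f),
       b || flags_list.any (fun f => PySem.Str.isIn "ACK" f),
       c || flags_list.any (fun f => PySem.Str.isIn "FIN" f),
       d || flags_list.any (fun f => PySem.Str.isIn "RST" f),
       e || flags_list.any (fun f => PySem.Str.isIn "PSH" f)) := by
  induction flags_list generalizing a b c d e with
  | nil => simp [analyze_tcp_flags_altLoop]
  | cons x xs ih =>
    simp only [analyze_tcp_flags_altLoop, List.foldl_cons, List.any_cons]
    rw [show (xs.foldl _ _ : Bool × Bool × Bool × Bool × Bool) = analyze_tcp_flags_altLoop xs _ from rfl, ih]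
    simp [Bool.or_assoc]

-- ===== VERDICT (by name: the statement is the Claim_ definition above) =====
theorem analyze_tcp_flags_spec : Claim_equal_analyze_tcp_flags := by
  intro l _
  unfold Spec_analyze_tcp_flags analyze_tcp_flags analyze_tcp_flags_alt
  rw [altLoop_eq]
  simp
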